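-- pv_equiv track=rewrite | github.com/MasoodM1/SWP_RubnS | 02_Pokersimulator/main1.py | strasse
-- ===== SOURCE A (Python) =====
-- symbole = ['2', '3', '4', '5', '6', '7', '8', '9', '10', 'Bube', 'Dame', 'König', 'Ass']
--
-- def strasse(werte):
--     for i in range(len(symbole) - 4):  # Die Schleife geht nur so weit, wie Platz für eine Straße ist
--         straßeGefunden = 0  # Setze den Zähler nur einmal pro möglicher Straßenkombination
--         for j in range(5):  # Eine mögliche Straße besteht aus 5 Karten
--             if symbole[i + j] in werte:  # Prüfe, ob der Wert in der Hand vorhanden ist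
--                 straßeGefunden += 1
--             else:
--                 break  # Wenn eine Karte fehlt, ist es keine Straße
--
--         if straßeGefunden == 5:
--             return True  # Wenn 5 Karten in Folge gefunden wurden, ist es eine Straße
--
--     return False  # Wenn keine Straße gefunden wurde, gib False zurück
-- ===== SOURCE B (Python) =====
-- symbole = ['2', '3', '4', '5', '6', '7', '8', '9', '10', 'Bube', 'Dame', 'König', 'Ass']
--
-- def strasse(werte):
--     run = 0
--     for s in symbole:
--         run = run + 1 if s in werte else 0
--         if run == 5:
--             return True
--     return False
-- ===== Notes on version B (the rewrite author's own statement) =====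
-- stated objective: simpler
-- what changed: Replaces the nested window rescan (for each of 9 start positions, re-test up to 5 memberships) by one flat pass over the 13 symbols maintaining the current run length of present symbols, returning True as soon as the run reaches 5.
import Mathlib
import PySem

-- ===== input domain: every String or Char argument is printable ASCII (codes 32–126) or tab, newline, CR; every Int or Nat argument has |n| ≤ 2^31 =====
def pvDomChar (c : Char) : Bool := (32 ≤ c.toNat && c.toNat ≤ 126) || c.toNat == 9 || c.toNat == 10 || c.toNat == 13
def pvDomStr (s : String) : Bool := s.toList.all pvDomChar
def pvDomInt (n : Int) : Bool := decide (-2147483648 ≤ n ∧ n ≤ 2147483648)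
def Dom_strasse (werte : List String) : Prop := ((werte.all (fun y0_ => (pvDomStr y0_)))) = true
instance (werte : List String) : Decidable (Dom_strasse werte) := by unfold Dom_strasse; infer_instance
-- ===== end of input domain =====

-- B replaces A's nested window rescan by one flat pass over the 13 symbols with a run counter (objective: simpler).

-- ===== PORT A =====
def symbole : List String := ["2", "3", "4", "5", "6", "7", "8", "9", "10", "Bube", "Dame", "König", "Ass"]

-- inner loop 'for j in range(5)' with break; symbole[i+j] is always in range here (i ≤ 8, j ≤ 4),
-- so getD is an exact port of the in-range list index symbole[i+j].
def strasseCount (werte : List String) (i : Nat) : List Nat → Nat → Nat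
  | [], cnt => cnt
  | j :: rest, cnt =>
    if werte.contains (symbole.getD (i + j) "") then strasseCount werte i rest (cnt + 1)
    else cnt  -- break

-- outer loop 'for i in range(len(symbole) - 4)' with early return True
def strasseLoop (werte : List String) : List Nat → Bool
  | [] => false
  | i :: rest =>
    if strasseCount werte i (List.range 5) 0 == 5 then true
    else strasseLoop werte rest

def strasse (werte : List String) : Bool := strasseLoop werte (List.range 9)

-- ===== PORT B =====
-- single pass over symbole with a run counter, early return at run == 5
def runScan (werte : List String) : List String → Nat → Bool
  | [], _ => false
  | s :: rest, run =>
    let run' := if werte.contains s then run + 1 else 0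
    if run' == 5 then true else runScan werte rest run'

def strasse_alt (werte : List String) : Bool := runScan werte symbole 0

-- ===== PRECONDITION & SPEC =====
def Spec_strasse (werte : List String) (out : Bool) : Prop := out = strasse_alt werte
instance (werte : List String) (out : Bool) : Decidable (Spec_strasse werte out) := by unfold Spec_strasse; infer_instance

-- ===== CLAIM (what is proved, stated in full; the proofs are below) =====
def Claim_equal_strasse : Prop := ∀ (werte : List String), Dom_strasse werte → Spec_strasse werte (strasse werte)

-- ===== LEMMAS AND PROOFS =====
theorem strasse_eq (werte : List String) : strasse werte = strasse_alt werte := by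
  show strasseLoop werte (List.range 9) = runScan werte symbole 0
  simp [List.range, List.range.loop, symbole, strasseLoop, strasseCount, runScan, List.getD]
  simp only [← List.contains_iff_mem]
  generalize werte.contains "2" = b0
  generalize werte.contains "3" = b1
  generalize werte.contains "4" = b2
  generalize werte.contains "5" = b3
  generalize werte.contains "6" = b4
  generalize werte.contains "7" = b5
  generalize werte.contains "8" = b6
  generalize werte.contains "9" = b7
  generalize werte.contains "10" = b8
  generalize werte.contains "Bube" = b9
  generalize werte.contains "Dame" = b10
  generalize werte.contains "König" = b11
  generalize werte.contains "Ass" = b12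
  revert b0 b1 b2 b3 b4 b5 b6 b7 b8 b9 b10 b11 b12
  decide

-- ===== VERDICT (by name: the statement is the Claim_ definition above) =====
theorem strasse_spec : Claim_equal_strasse := by
  intro werte _
  unfold Spec_strasse
  exact strasse_eq werte
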